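-- pv_equiv track=rewrite | github.com/macro128/pdm-conda | pdm_conda/project.py | _requirement_map
-- ===== SOURCE A (Python) =====
-- def _requirement_map(requirement: str, mapping: dict):
--     requirement = requirement.strip()
--     name = requirement
--     for s in (">", "<", "=", "!", "~", " "):
--         name = name.split(s, maxsplit=1)[0]
--     name = name.strip()
--     _name = name.split("[")[0].split("::")[-1]
--     map_name = mapping.get(_name, name)
--     requirement = f"{map_name}{requirement[len(name):]}"
--     return requirement, map_name, name
-- ===== SOURCE B (Python) =====
-- def _finish(requirement, name, mapping):
--     name = name.strip()
--     _name = name.split("[")[0].split("::")[-1]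
--     map_name = mapping.get(_name, name)
--     return f"{map_name}{requirement[len(name):]}", map_name, name
--
--
-- def _requirement_map(requirement: str, mapping: dict):
--     requirement = requirement.strip()
--     chars = []
--     for ch in requirement:
--         if ch in "<>=!~ ":
--             break
--         chars.append(ch)
--     return _finish(requirement, "".join(chars), mapping)
-- ===== Notes on version B (the rewrite author's own statement) =====
-- stated objective: simpler
-- what changed: The package-name prefix is found by one character scan that stops at the first delimiter in '<>=!~ ' instead of A's six sequential split(sep, maxsplit=1)[0] passes; the strip/'['/'::' extraction, mapping lookup and suffix reconstruction are kept.
import Mathlib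
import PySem

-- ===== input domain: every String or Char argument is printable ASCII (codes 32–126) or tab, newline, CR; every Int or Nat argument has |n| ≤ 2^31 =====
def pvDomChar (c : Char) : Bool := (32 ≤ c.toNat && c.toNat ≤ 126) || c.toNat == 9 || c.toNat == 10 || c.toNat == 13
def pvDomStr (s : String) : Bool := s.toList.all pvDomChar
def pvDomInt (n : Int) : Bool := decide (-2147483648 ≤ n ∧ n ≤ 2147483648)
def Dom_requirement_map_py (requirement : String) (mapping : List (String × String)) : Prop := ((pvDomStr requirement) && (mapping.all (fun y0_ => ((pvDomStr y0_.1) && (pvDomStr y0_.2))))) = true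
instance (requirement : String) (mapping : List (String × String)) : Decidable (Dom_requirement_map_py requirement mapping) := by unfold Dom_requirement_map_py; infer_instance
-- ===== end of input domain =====

-- B replaces A's six sequential maxsplit-1 splits by one character scan that stops at the
-- first delimiter (objective: simpler — a single pass instead of six split passes).

-- ===== PORT A =====
-- literal transliteration of A: strip, then for each of the six separators take
-- name.split(s, maxsplit=1)[0], then strip, the "["/"::" extraction, the dict lookup
-- and the f-string reconstruction.
def requirement_map_py (requirement : String) (mapping : List (String × String)) : String × String × String :=
  let r := PySem.Chars.strip requirement.toList
  let name :=
    [['>'], ['<'], ['='], ['!'], ['~'], [' ']].foldl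
      (fun n s => (PySem.List.pyGet? ((PySem.Chars.splitMax? n s 1).getD []) 0).getD []) r
  let name := PySem.Chars.strip name
  let nm := (PySem.List.pyGet? (PySem.Chars.splitOn name ['[']) 0).getD []
  let nm := (PySem.List.pyGet? (PySem.Chars.splitOn nm [':', ':']) (-1)).getD []
  let map_name := (PySem.Dict.mk mapping).getD (String.ofList nm) (String.ofList name)
  let req := map_name.toList ++ PySem.List.slice r (some (PySem.Chars.len name)) none
  (String.ofList req, map_name, String.ofList name)

-- ===== PORT B =====
-- the for/break loop of Source B collecting characters until the first delimiter
def pvScanName : List Char → List Char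
  | [] => []
  | c :: rest => if c = '<' ∨ c = '>' ∨ c = '=' ∨ c = '!' ∨ c = '~' ∨ c = ' ' then []
                 else c :: pvScanName rest

-- Source B's _finish helper: strip, "["/"::" extraction, lookup, reconstruction
def pvFinish (r name0 : List Char) (mapping : List (String × String)) : String × String × String :=
  let name := PySem.Chars.strip name0
  let nm := (PySem.List.pyGet? (PySem.Chars.splitOn name ['[']) 0).getD []
  let nm := (PySem.List.pyGet? (PySem.Chars.splitOn nm [':', ':']) (-1)).getD []
  let map_name := (PySem.Dict.mk mapping).getD (String.ofList nm) (String.ofList name)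
  let req := map_name.toList ++ PySem.List.slice r (some (PySem.Chars.len name)) none
  (String.ofList req, map_name, String.ofList name)

def requirement_map_py_alt (requirement : String) (mapping : List (String × String)) : String × String × String :=
  let r := PySem.Chars.strip requirement.toList
  pvFinish r (pvScanName r) mapping

-- ===== PRECONDITION & SPEC =====
def Spec_requirement_map_py (requirement : String) (mapping : List (String × String)) (out : String × String × String) : Prop := out = requirement_map_py_alt requirement mapping
instance (requirement : String) (mapping : List (String × String)) (out : String × String × String) : Decidable (Spec_requirement_map_py requirement mapping out) := by unfold Spec_requirement_map_py; infer_instance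

-- ===== CLAIM (what is proved, stated in full; the proofs are below) =====
def Claim_equal_requirement_map_py : Prop := ∀ (requirement : String) (mapping : List (String × String)), Dom_requirement_map_py requirement mapping → Spec_requirement_map_py requirement mapping (requirement_map_py requirement mapping)

-- ===== LEMMAS AND PROOFS =====

-- splitOnMax.go with maxsplit budget 0 and exactly one piece already accumulated:
-- the head of the result is that piece.
theorem pv_go_zero (sep : List Char) (fuel : Nat) (l cur p : List Char) :
    (PySem.Chars.splitOnMax.go sep fuel 0 l cur [p]).head? = some p := by
  cases fuel <;> cases l <;> simp [PySem.Chars.splitOnMax.go]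

-- with budget 1 and single-char separator, the head of go is cur.reverse ++ the
-- prefix of l before the first occurrence of c
theorem pv_go_one (c : Char) : ∀ (fuel : Nat) (l cur : List Char), l.length < fuel →
    (PySem.Chars.splitOnMax.go [c] fuel 1 l cur []).head?
      = some (cur.reverse ++ l.takeWhile (fun a => !(a == c))) := by
  intro fuel
  induction fuel with
  | zero => intro l cur h; omega
  | succ n ih =>
    intro l cur h
    cases l with
    | nil => simp [PySem.Chars.splitOnMax.go]
    | cons c' rest =>
      by_cases hc : c = c'
      · subst hc
        simp [PySem.Chars.splitOnMax.go, List.isPrefixOf, pv_go_zero, List.takeWhile]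
      · simp only [PySem.Chars.splitOnMax.go, List.isPrefixOf, List.takeWhile]
        have h1 : (c == c') = false := by simp [hc]
        have h2 : (c' == c) = false := by simp [Ne.symm hc]
        simp [h1, h2, ih rest (c' :: cur) (by simp at h ⊢; omega)]

-- one step of A's split loop is a takeWhile
theorem pv_split_step (c : Char) (l : List Char) :
    (PySem.List.pyGet? ((PySem.Chars.splitMax? l [c] 1).getD []) 0).getD []
      = l.takeWhile (fun a => !(a == c)) := by
  have h : (PySem.Chars.splitOnMax l [c] 1).head?
      = some (l.takeWhile (fun a => !(a == c))) := by
    simpa using pv_go_one c (l.length + 1) l [] (by omega)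
  simp [PySem.Chars.splitMax?, PySem.Chars.splitOnMax] at h ⊢
  simp [PySem.List.pyGet?_zero, ← List.head?_eq_getElem?, h]

-- B's scan is a takeWhile on the complement of the delimiter set
theorem pv_scan_eq_takeWhile (l : List Char) :
    pvScanName l = l.takeWhile
      (fun a => !(a == '<' || a == '>' || a == '=' || a == '!' || a == '~' || a == ' ')) := by
  induction l with
  | nil => rfl
  | cons c rest ih =>
    simp only [pvScanName, List.takeWhile, ih]
    by_cases h : c = '<' ∨ c = '>' ∨ c = '=' ∨ c = '!' ∨ c = '~' ∨ c = ' '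
    · rcases h with rfl | rfl | rfl | rfl | rfl | rfl <;> simp
    · have hs : (!(c == '<' || c == '>' || c == '=' || c == '!' || c == '~' || c == ' ')) = true := by
        simp only [Bool.not_eq_eq_eq_not, Bool.not_true, Bool.or_eq_false_iff, beq_eq_false_iff_ne]
        tauto
      rw [if_neg h, hs]

-- the two name computations agree
theorem pv_name_eq (r : List Char) :
    [['>'], ['<'], ['='], ['!'], ['~'], [' ']].foldl
      (fun n s => (PySem.List.pyGet? ((PySem.Chars.splitMax? n s 1).getD []) 0).getD []) r
      = pvScanName r := by
  simp only [List.foldl, pv_split_step, List.takeWhile_takeWhile, pv_scan_eq_takeWhile]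
  congr 1
  funext a
  by_cases h1 : a = '>' <;> by_cases h2 : a = '<' <;> by_cases h3 : a = '=' <;>
    by_cases h4 : a = '!' <;> by_cases h5 : a = '~' <;> by_cases h6 : a = ' ' <;>
    simp [h1, h2, h3, h4, h5, h6]

-- ===== VERDICT (by name: the statement is the Claim_ definition above) =====
theorem requirement_map_py_spec : Claim_equal_requirement_map_py := by
  intro requirement mapping _
  unfold Spec_requirement_map_py requirement_map_py requirement_map_py_alt pvFinish
  simp only [pv_name_eq]
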